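-- pv_equiv track=rewrite | github.com/drhaun/bcompnutritiontool | intelligent_macro_optimizer.py | _get_fallback_nutrition
-- ===== SOURCE A (Python) =====
-- from typing import Dict, List, Tuple, Optional
--
-- def _get_fallback_nutrition(ingredient_name: str) -> Dict:
--     """Provide fallback nutrition estimates"""
--     name_lower = ingredient_name.lower()
--
--     # Basic food category estimates
--     if any(meat in name_lower for meat in ["chicken", "turkey", "beef", "pork"]):
--         return {"protein_per_100g": 25, "carbs_per_100g": 0, "fat_per_100g": 5, "calories_per_100g": 150}
--     elif any(fish in name_lower for fish in ["salmon", "tuna", "cod", "fish"]):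
--         return {"protein_per_100g": 22, "carbs_per_100g": 0, "fat_per_100g": 8, "calories_per_100g": 155}
--     elif "egg" in name_lower:
--         return {"protein_per_100g": 13, "carbs_per_100g": 1, "fat_per_100g": 11, "calories_per_100g": 155}
--     elif any(grain in name_lower for grain in ["rice", "quinoa", "oats", "bread"]):
--         return {"protein_per_100g": 3, "carbs_per_100g": 25, "fat_per_100g": 1, "calories_per_100g": 120}
--     elif any(veg in name_lower for veg in ["broccoli", "spinach", "carrot", "pepper"]):
--         return {"protein_per_100g": 2, "carbs_per_100g": 5, "fat_per_100g": 0, "calories_per_100g": 25}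
--     elif "oil" in name_lower:
--         return {"protein_per_100g": 0, "carbs_per_100g": 0, "fat_per_100g": 100, "calories_per_100g": 884}
--     else:
--         return {"protein_per_100g": 5, "carbs_per_100g": 10, "fat_per_100g": 2, "calories_per_100g": 80}
-- ===== SOURCE B (Python) =====
-- # Priority-minimization rewrite: one flat keyword->priority map, single pass
-- # tracking the minimum matched priority, then index into a nutrition table.
-- _KEYWORD_PRIORITY = {
--     "chicken": 0, "turkey": 0, "beef": 0, "pork": 0,
--     "salmon": 1, "tuna": 1, "cod": 1, "fish": 1,
--     "egg": 2,
--     "rice": 3, "quinoa": 3, "oats": 3, "bread": 3,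
--     "broccoli": 4, "spinach": 4, "carrot": 4, "pepper": 4,
--     "oil": 5,
-- }
--
-- _NUTRITION = [
--     {"protein_per_100g": 25, "carbs_per_100g": 0, "fat_per_100g": 5, "calories_per_100g": 150},
--     {"protein_per_100g": 22, "carbs_per_100g": 0, "fat_per_100g": 8, "calories_per_100g": 155},
--     {"protein_per_100g": 13, "carbs_per_100g": 1, "fat_per_100g": 11, "calories_per_100g": 155},
--     {"protein_per_100g": 3, "carbs_per_100g": 25, "fat_per_100g": 1, "calories_per_100g": 120},
--     {"protein_per_100g": 2, "carbs_per_100g": 5, "fat_per_100g": 0, "calories_per_100g": 25},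
--     {"protein_per_100g": 0, "carbs_per_100g": 0, "fat_per_100g": 100, "calories_per_100g": 884},
--     {"protein_per_100g": 5, "carbs_per_100g": 10, "fat_per_100g": 2, "calories_per_100g": 80},
-- ]
--
--
-- def _get_fallback_nutrition(ingredient_name: str):
--     name_lower = ingredient_name.lower()
--     best = 6  # index of the default entry
--     for kw, p in _KEYWORD_PRIORITY.items():
--         if p < best and kw in name_lower:
--             best = p
--     return dict(_NUTRITION[best])
-- ===== Notes on version B (the rewrite author's own statement) =====
-- stated objective: alternative
-- what changed: Replaces the six-branch if/elif chain by a flat keyword-to-priority map scanned in one pass that minimizes the matched priority, then indexes a nutrition table; correct because the first matching branch in A is exactly the minimal-priority matching category.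
import Mathlib
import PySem

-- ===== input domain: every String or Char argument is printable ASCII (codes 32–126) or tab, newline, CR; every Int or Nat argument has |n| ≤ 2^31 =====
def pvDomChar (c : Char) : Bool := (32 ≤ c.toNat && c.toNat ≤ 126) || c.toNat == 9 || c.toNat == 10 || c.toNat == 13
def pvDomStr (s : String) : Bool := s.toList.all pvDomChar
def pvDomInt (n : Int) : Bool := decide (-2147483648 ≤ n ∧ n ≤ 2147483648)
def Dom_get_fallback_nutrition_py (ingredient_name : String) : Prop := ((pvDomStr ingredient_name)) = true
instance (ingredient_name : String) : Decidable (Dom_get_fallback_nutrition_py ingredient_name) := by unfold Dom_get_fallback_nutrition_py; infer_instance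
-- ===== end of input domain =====

-- B replaces A's if/elif chain by a flat keyword->priority map scanned once, minimizing the matched priority, then indexing a nutrition table (alternative algorithm, same behaviour).


-- ===== PORT A =====
def get_fallback_nutrition_py (ingredient_name : String) : List (String × Int) :=
  let name_lower := PySem.Str.lower ingredient_name
  if (["chicken", "turkey", "beef", "pork"].any (fun meat => PySem.Str.isIn meat name_lower)) then
    [("protein_per_100g", 25), ("carbs_per_100g", 0), ("fat_per_100g", 5), ("calories_per_100g", 150)]
  else if (["salmon", "tuna", "cod", "fish"].any (fun fish => PySem.Str.isIn fish name_lower)) then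
    [("protein_per_100g", 22), ("carbs_per_100g", 0), ("fat_per_100g", 8), ("calories_per_100g", 155)]
  else if PySem.Str.isIn "egg" name_lower then
    [("protein_per_100g", 13), ("carbs_per_100g", 1), ("fat_per_100g", 11), ("calories_per_100g", 155)]
  else if (["rice", "quinoa", "oats", "bread"].any (fun grain => PySem.Str.isIn grain name_lower)) then
    [("protein_per_100g", 3), ("carbs_per_100g", 25), ("fat_per_100g", 1), ("calories_per_100g", 120)]
  else if (["broccoli", "spinach", "carrot", "pepper"].any (fun veg => PySem.Str.isIn veg name_lower)) then
    [("protein_per_100g", 2), ("carbs_per_100g", 5), ("fat_per_100g", 0), ("calories_per_100g", 25)]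
  else if PySem.Str.isIn "oil" name_lower then
    [("protein_per_100g", 0), ("carbs_per_100g", 0), ("fat_per_100g", 100), ("calories_per_100g", 884)]
  else
    [("protein_per_100g", 5), ("carbs_per_100g", 10), ("fat_per_100g", 2), ("calories_per_100g", 80)]

-- ===== PORT B =====
-- B: flat keyword -> priority map (insertion order), nutrition table indexed by priority.
def pvKwPrio : List (String × Nat) :=
  [("chicken", 0), ("turkey", 0), ("beef", 0), ("pork", 0),
   ("salmon", 1), ("tuna", 1), ("cod", 1), ("fish", 1),
   ("egg", 2),
   ("rice", 3), ("quinoa", 3), ("oats", 3), ("bread", 3),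
   ("broccoli", 4), ("spinach", 4), ("carrot", 4), ("pepper", 4),
   ("oil", 5)]

def pvNutrition : List (List (String × Int)) :=
  [ [("protein_per_100g", 25), ("carbs_per_100g", 0), ("fat_per_100g", 5), ("calories_per_100g", 150)],
    [("protein_per_100g", 22), ("carbs_per_100g", 0), ("fat_per_100g", 8), ("calories_per_100g", 155)],
    [("protein_per_100g", 13), ("carbs_per_100g", 1), ("fat_per_100g", 11), ("calories_per_100g", 155)],
    [("protein_per_100g", 3), ("carbs_per_100g", 25), ("fat_per_100g", 1), ("calories_per_100g", 120)],
    [("protein_per_100g", 2), ("carbs_per_100g", 5), ("fat_per_100g", 0), ("calories_per_100g", 25)],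
    [("protein_per_100g", 0), ("carbs_per_100g", 0), ("fat_per_100g", 100), ("calories_per_100g", 884)],
    [("protein_per_100g", 5), ("carbs_per_100g", 10), ("fat_per_100g", 2), ("calories_per_100g", 80)] ]

def pvStep (name_lower : String) (best : Nat) (kp : String × Nat) : Nat :=
  if decide (kp.2 < best) && PySem.Str.isIn kp.1 name_lower then kp.2 else best

def get_fallback_nutrition_py_alt (ingredient_name : String) : List (String × Int) :=
  let name_lower := PySem.Str.lower ingredient_name
  let best := pvKwPrio.foldl (pvStep name_lower) 6
  pvNutrition.getD best []

-- ===== PRECONDITION & SPEC =====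
def Spec_get_fallback_nutrition_py (ingredient_name : String) (out : List (String × Int)) : Prop := out = get_fallback_nutrition_py_alt ingredient_name
instance (ingredient_name : String) (out : List (String × Int)) : Decidable (Spec_get_fallback_nutrition_py ingredient_name out) := by unfold Spec_get_fallback_nutrition_py; infer_instance

-- ===== CLAIM (what is proved, stated in full; the proofs are below) =====
def Claim_equal_get_fallback_nutrition_py : Prop := ∀ (ingredient_name : String), Dom_get_fallback_nutrition_py ingredient_name → Spec_get_fallback_nutrition_py ingredient_name (get_fallback_nutrition_py ingredient_name)

-- ===== LEMMAS AND PROOFS =====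

-- Folding pvStep over a constant-priority group is: take p iff some keyword of the
-- group occurs in the name and p improves on the accumulator.
theorem pvStep_group (nl : String) (p : Nat) (kws : List String) :
    ∀ (acc : Nat),
      List.foldl (pvStep nl) acc (kws.map (fun k => (k, p)))
        = if (kws.any (fun k => PySem.Str.isIn k nl)) && decide (p < acc) then p else acc := by
  induction kws with
  | nil => intro acc; simp
  | cons k rest ih =>
    intro acc
    simp only [List.map_cons, List.foldl_cons, List.any_cons, pvStep]
    rw [ih]
    by_cases hlt : p < acc
    · by_cases hin : PySem.Str.isIn k nl = true
      · have hin' : PySem.Chars.isIn k.toList nl.toList = true := by simpa using hin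
        simp [hlt, hin']
      · have hin' : ¬ PySem.Chars.isIn k.toList nl.toList = true := by simpa using hin
        simp [hlt, hin']
    · simp [hlt]

-- ===== VERDICT (by name: the statement is the Claim_ definition above) =====
theorem get_fallback_nutrition_py_spec : Claim_equal_get_fallback_nutrition_py := by
  intro ingredient_name _
  unfold Spec_get_fallback_nutrition_py get_fallback_nutrition_py get_fallback_nutrition_py_alt
  set nl := PySem.Str.lower ingredient_name with hnl
  have htable : pvKwPrio
      = (["chicken", "turkey", "beef", "pork"].map (fun k => (k, 0)))
        ++ (["salmon", "tuna", "cod", "fish"].map (fun k => (k, 1)))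
        ++ (["egg"].map (fun k => (k, 2)))
        ++ (["rice", "quinoa", "oats", "bread"].map (fun k => (k, 3)))
        ++ (["broccoli", "spinach", "carrot", "pepper"].map (fun k => (k, 4)))
        ++ (["oil"].map (fun k => (k, 5))) := by rfl
  rw [htable]
  simp only [List.foldl_append, pvStep_group, List.any_cons, List.any_nil, Bool.or_false]
  generalize (PySem.Str.isIn "chicken" nl || (PySem.Str.isIn "turkey" nl || (PySem.Str.isIn "beef" nl || PySem.Str.isIn "pork" nl))) = a0
  generalize (PySem.Str.isIn "salmon" nl || (PySem.Str.isIn "tuna" nl || (PySem.Str.isIn "cod" nl || PySem.Str.isIn "fish" nl))) = a1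
  generalize (PySem.Str.isIn "egg" nl) = a2
  generalize (PySem.Str.isIn "rice" nl || (PySem.Str.isIn "quinoa" nl || (PySem.Str.isIn "oats" nl || PySem.Str.isIn "bread" nl))) = a3
  generalize (PySem.Str.isIn "broccoli" nl || (PySem.Str.isIn "spinach" nl || (PySem.Str.isIn "carrot" nl || PySem.Str.isIn "pepper" nl))) = a4
  generalize (PySem.Str.isIn "oil" nl) = a5
  revert a0 a1 a2 a3 a4 a5
  decide
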